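-- pv_equiv track=rewrite | github.com/liucheng2912/py | leecode/easy/207/1342.py | f
-- ===== SOURCE A (Python) =====
-- def f(num):
--     temp=0
--     while num>0:
--         if num%2==0:
--             temp+=1
--             num=num//2
--         else:
--             num=num-1
--             temp+=1
--     return temp
-- ===== SOURCE B (Python) =====
-- def f(num):
--     # closed form: number of halvings is bit_length-1, each set bit costs one decrement
--     if num <= 0:
--         return 0
--     return num.bit_length() - 1 + bin(num).count('1')
-- ===== Notes on version B (the rewrite author's own statement) =====
-- stated objective: simpler
-- what changed: Replaces the step-by-step halve/decrement simulation loop with a closed form read off the binary representation: bit_length-1 halvings plus one decrement per set bit.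
import Mathlib
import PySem

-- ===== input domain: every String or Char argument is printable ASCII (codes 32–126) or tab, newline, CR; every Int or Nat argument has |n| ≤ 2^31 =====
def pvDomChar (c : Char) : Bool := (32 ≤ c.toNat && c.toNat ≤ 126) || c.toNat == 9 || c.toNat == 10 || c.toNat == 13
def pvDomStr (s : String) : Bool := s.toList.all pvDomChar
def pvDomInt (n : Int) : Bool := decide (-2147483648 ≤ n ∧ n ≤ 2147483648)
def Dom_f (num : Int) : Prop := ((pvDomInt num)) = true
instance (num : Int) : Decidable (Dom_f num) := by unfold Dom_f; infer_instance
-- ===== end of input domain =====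

-- B replaces A's halve/decrement simulation loop by the closed form bit_length-1 + popcount.

-- ===== PORT A =====
-- the while loop of A, carrying (num, temp)
def fGo (num temp : Int) : Int :=
  if h : num > 0 then
    if PySem.Int.mod num 2 = 0 then
      fGo (PySem.Int.floordiv num 2) (temp + 1)
    else
      fGo (num - 1) (temp + 1)
  else temp
termination_by num.toNat
decreasing_by
  · rw [PySem.Int.floordiv_eq_ediv_of_pos (by omega)]; omega
  · omega

def f (num : Int) : Int := fGo num 0

-- ===== PORT B =====
def f_alt (num : Int) : Int :=
  if num ≤ 0 then 0
  else (PySem.Int.bitLength num : Int) - 1 + (PySem.Int.bitCount num : Int)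

-- ===== PRECONDITION & SPEC =====
def Spec_f (num : Int) (out : Int) : Prop := out = f_alt num
instance (num : Int) (out : Int) : Decidable (Spec_f num out) := by unfold Spec_f; infer_instance

-- ===== CLAIM (what is proved, stated in full; the proofs are below) =====
def Claim_equal_f : Prop := ∀ (num : Int), Dom_f num → Spec_f num (f num)

-- ===== LEMMAS AND PROOFS =====

lemma fGo_eq (n : Nat) : ∀ (num temp : Int), num.toNat = n → fGo num temp = temp + f_alt num := by
  induction n using Nat.strong_induction_on with
  | _ n ih =>
    intro num temp hn
    rw [fGo]
    by_cases hpos : num > 0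
    · have hm : PySem.Int.mod num 2 = num % 2 := PySem.Int.mod_eq_emod_of_pos (by omega)
      have hf : PySem.Int.floordiv num 2 = num / 2 := PySem.Int.floordiv_eq_ediv_of_pos (by omega)
      have hbl := PySem.Int.bitLength_of_pos (n := num) hpos
      have hbc := PySem.Int.bitCount_of_pos (n := num) hpos
      rw [dif_pos hpos]
      by_cases hev : PySem.Int.mod num 2 = 0
      · -- even step: num := num // 2
        have hk : num / 2 > 0 := by rw [hm] at hev; omega
        have hlt : (num / 2).toNat < n := by omega
        rw [if_pos hev, hf, ih _ hlt _ _ rfl]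
        simp only [f_alt, if_neg (by omega : ¬ num ≤ 0), if_neg (by omega : ¬ num / 2 ≤ 0)]
        rw [hf] at hbl hbc
        rw [hm] at hev
        rw [hbl, hbc, hm, hev]
        push_cast
        ring
      · -- odd step: num := num - 1
        have hmod : num % 2 = 1 := by rw [hm] at hev; omega
        have hlt : (num - 1).toNat < n := by omega
        rw [if_neg hev, ih _ hlt _ _ rfl]
        simp only [f_alt, if_neg (by omega : ¬ num ≤ 0)]
        by_cases h1 : num = 1
        · subst h1; norm_num [f_alt]; decide
        · have h3 : num ≥ 3 := by omega
          rw [if_neg (by omega : ¬ num - 1 ≤ 0)]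
          have hbl' := PySem.Int.bitLength_of_pos (n := num - 1) (by omega)
          have hbc' := PySem.Int.bitCount_of_pos (n := num - 1) (by omega)
          have hfd : PySem.Int.floordiv (num - 1) 2 = num / 2 := by
            rw [PySem.Int.floordiv_eq_ediv_of_pos (by omega)]; omega
          have hm' : PySem.Int.mod (num - 1) 2 = 0 := by
            rw [PySem.Int.mod_eq_emod_of_pos (by omega)]; omega
          rw [hf] at hbl hbc
          rw [hfd] at hbl' hbc'
          rw [hm'] at hbc'
          rw [hbl, hbc, hbl', hbc', hm, hmod]
          push_cast
          ring
    · rw [dif_neg hpos]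
      simp only [f_alt, if_pos (by omega : num ≤ 0)]
      ring

-- ===== VERDICT (by name: the statement is the Claim_ definition above) =====
theorem f_spec : Claim_equal_f := by
  intro num _
  unfold Spec_f f
  rw [fGo_eq num.toNat num 0 rfl]
  ring
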